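-- pv_equiv track=rewrite | github.com/aisspr/leetcode | GCA/q3.py | newRoadSystem
-- ===== SOURCE A (Python) =====
-- def newRoadSystem(roadRegister):
--     n = len(roadRegister)
--     for i in range(n):
--         out_degree = sum(roadRegister[i]) # This is the sum of '1's in row 'i'
--         in_degree = sum(roadRegister[j][i] for j in range(n)) #This is the sum of '1's in column 'i'
--
--         if out_degree != in_degree:
--             return False
--     return True
-- ===== SOURCE B (Python) =====
-- def newRoadSystem(roadRegister):
--     n = len(roadRegister)
--     col = [0] * n
--     rowsum = []
--     for r in roadRegister:
--         rowsum.append(sum(r))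
--         col = [c + v for c, v in zip(col, r)]
--     return rowsum == col
-- ===== Notes on version B (the rewrite author's own statement) =====
-- stated objective: alternative
-- what changed: B makes a single pass over the rows accumulating a row-sum list and a zip-accumulated column-sum list, then compares the two lists, instead of A re-scanning the whole matrix column-wise for every node with an early return.
import Mathlib
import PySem

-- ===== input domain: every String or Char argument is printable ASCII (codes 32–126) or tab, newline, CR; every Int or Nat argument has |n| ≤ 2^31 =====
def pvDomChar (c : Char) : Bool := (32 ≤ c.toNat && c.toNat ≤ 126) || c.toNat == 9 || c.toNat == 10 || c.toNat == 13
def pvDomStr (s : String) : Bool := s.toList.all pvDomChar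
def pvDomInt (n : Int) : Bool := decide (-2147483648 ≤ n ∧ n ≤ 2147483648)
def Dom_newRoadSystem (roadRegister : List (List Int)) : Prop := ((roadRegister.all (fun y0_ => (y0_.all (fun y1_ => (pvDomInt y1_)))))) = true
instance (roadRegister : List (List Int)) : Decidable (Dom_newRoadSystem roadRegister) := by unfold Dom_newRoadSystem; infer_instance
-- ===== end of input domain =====

-- B replaces A's per-node column rescans by one pass that accumulates row-sum and column-sum
-- tables and a final list comparison (objective: alternative decomposition; return value only).


-- ===== PORT A =====
-- loop 'for i in range(n)' with early return False on the first degree mismatch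
def pvALoop (rr : List (List Int)) (n : Int) : List Int → Bool
  | [] => true
  | i :: rest =>
    let out_degree := (PySem.List.pyGetD rr i []).foldl (· + ·) 0
    let in_degree := (PySem.List.pyRange 0 n 1).foldl
      (fun acc j => acc + PySem.List.pyGetD (PySem.List.pyGetD rr j []) i 0) 0
    if out_degree ≠ in_degree then false else pvALoop rr n rest

def newRoadSystem (roadRegister : List (List Int)) : Bool :=
  let n : Int := roadRegister.length
  pvALoop roadRegister n (PySem.List.pyRange 0 n 1)

-- ===== PORT B =====
-- one pass: accumulate rowsum (full-row sums) and col (zip-truncated column sums), then compare the lists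
def newRoadSystem_alt (roadRegister : List (List Int)) : Bool :=
  let n := roadRegister.length
  let acc := roadRegister.foldl
    (fun (st : List Int × List Int) r =>
      (List.zipWith (fun c v => c + v) st.1 r, st.2 ++ [r.foldl (· + ·) 0]))
    (List.replicate n 0, ([] : List Int))
  acc.2 == acc.1

-- ===== PRECONDITION & SPEC =====
-- Pre_ is exactly the set of inputs on which A returns normally: either every row has at
-- least n entries (no column access can miss), or some fully-present column k witnesses an
-- out/in-degree mismatch, so A returns False before its scan can reach a missing entry.
-- Excluded are only the inputs on which A raises IndexError.
def Pre_newRoadSystem (roadRegister : List (List Int)) : Prop :=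
  (∀ r ∈ roadRegister, roadRegister.length ≤ r.length) ∨
  (∃ k < roadRegister.length, (∀ r ∈ roadRegister, k < r.length) ∧
    (roadRegister.getD k []).sum ≠ (roadRegister.map (fun r => r.getD k 0)).sum)
instance (roadRegister : List (List Int)) : Decidable (Pre_newRoadSystem roadRegister) := by unfold Pre_newRoadSystem; infer_instance
def pvWitness_newRoadSystem : List (List Int) := [[0, 1], [1, 0]]
def Spec_newRoadSystem (roadRegister : List (List Int)) (out : Bool) : Prop := out = newRoadSystem_alt roadRegister
instance (roadRegister : List (List Int)) (out : Bool) : Decidable (Spec_newRoadSystem roadRegister out) := by unfold Spec_newRoadSystem; infer_instance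

-- ===== CLAIM (what is proved, stated in full; the proofs are below) =====
def Claim_equal_newRoadSystem : Prop := ∀ (roadRegister : List (List Int)), Dom_newRoadSystem roadRegister → Pre_newRoadSystem roadRegister → Spec_newRoadSystem roadRegister (newRoadSystem roadRegister)

-- ===== LEMMAS AND PROOFS =====

-- ===== VERDICT (by name: the statement is the Claim_ definition above) =====
-- A's loop returns true iff every index in the list passes the degree check
theorem pvALoop_eq_all (rr : List (List Int)) (n : Int) (is : List Int) :
    pvALoop rr n is = is.all (fun i =>
      (PySem.List.pyGetD rr i []).foldl (· + ·) 0
        == (PySem.List.pyRange 0 n 1).foldl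
             (fun acc j => acc + PySem.List.pyGetD (PySem.List.pyGetD rr j []) i 0) 0) := by
  induction is with
  | nil => rfl
  | cons i rest ih =>
    simp only [pvALoop, List.all_cons, ih]
    by_cases h : (PySem.List.pyGetD rr i []).foldl (· + ·) 0
        = (PySem.List.pyRange 0 n 1).foldl
             (fun acc j => acc + PySem.List.pyGetD (PySem.List.pyGetD rr j []) i 0) 0
    · simp [h]
    · simp [h]

-- B's fold, unrolled: first component accumulates zipWith-sums, second the row sums
theorem pvBFold_eq (rs : List (List Int)) (col rows : List Int) :
    rs.foldl (fun (st : List Int × List Int) r =>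
        (List.zipWith (fun c v => c + v) st.1 r, st.2 ++ [r.foldl (· + ·) 0])) (col, rows)
      = (rs.foldl (fun c r => List.zipWith (fun c v => c + v) c r) col,
         rows ++ rs.map (fun r => r.foldl (· + ·) 0)) := by
  induction rs generalizing col rows with
  | nil => simp
  | cons r rs ih => simp [ih]

theorem pvColFold_length (rs : List (List Int)) (col : List Int)
    (h : ∀ r ∈ rs, col.length ≤ r.length) :
    (rs.foldl (fun c r => List.zipWith (fun c v => c + v) c r) col).length = col.length := by
  induction rs generalizing col with
  | nil => rfl
  | cons r rs ih =>
    have hr : col.length ≤ r.length := h r (by simp)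
    have hlen : (List.zipWith (fun c v => c + v) col r).length = col.length := by
      simp [List.length_zipWith]; omega
    simp only [List.foldl_cons]
    rw [ih]
    · exact hlen
    · intro r' hr'; rw [hlen]; exact h r' (by simp [hr'])

theorem pvColFold_getD (rs : List (List Int)) (col : List Int) (k : Nat)
    (h : ∀ r ∈ rs, col.length ≤ r.length) (hk : k < col.length) :
    (rs.foldl (fun c r => List.zipWith (fun c v => c + v) c r) col).getD k 0
      = col.getD k 0 + (rs.map (fun r => r.getD k 0)).sum := by
  induction rs generalizing col with
  | nil => simp
  | cons r rs ih =>
    have hr : col.length ≤ r.length := h r (by simp)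
    have hlen : (List.zipWith (fun c v => c + v) col r).length = col.length := by
      simp [List.length_zipWith]; omega
    simp only [List.foldl_cons]
    rw [ih]
    · have h1 : (List.zipWith (fun c v => c + v) col r).getD k 0 = col.getD k 0 + r.getD k 0 := by
        rw [List.getD_eq_getElem _ _ (by omega), List.getD_eq_getElem _ _ hk,
            List.getD_eq_getElem _ _ (by omega)]
        simp [List.getElem_zipWith]
      rw [h1]; simp [List.map_cons]; ring
    · intro r' hr'; rw [hlen]; exact h r' (by simp [hr'])
    · omega

-- the column fold never grows past any processed row's length
theorem pvColFold_length_le (rs : List (List Int)) (col : List Int) (r : List Int)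
    (hr : r ∈ rs) :
    (rs.foldl (fun c r => List.zipWith (fun c v => c + v) c r) col).length ≤ r.length := by
  induction rs generalizing col with
  | nil => cases hr
  | cons r0 rs ih =>
    simp only [List.foldl_cons]
    rcases List.mem_cons.1 hr with h | h
    · subst h
      calc (rs.foldl (fun c r => List.zipWith (fun c v => c + v) c r)
              (List.zipWith (fun c v => c + v) col r)).length
          ≤ (List.zipWith (fun c v => c + v) col r).length := by
            clear ih hr
            induction rs generalizing col r with
            | nil => simp
            | cons r1 rs ih1 =>
              simp only [List.foldl_cons]
              calc _ ≤ (List.zipWith (fun c v => c + v)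
                        (List.zipWith (fun c v => c + v) col r) r1).length := ih1 _ _
                _ ≤ _ := by simp [List.length_zipWith]
        _ ≤ r.length := by simp [List.length_zipWith]
    · exact ih _ h

-- equivalence on matrices whose rows all have at least n entries
theorem pvMain_wide (rr : List (List Int))
    (hpre : ∀ r ∈ rr, rr.length ≤ r.length) :
    newRoadSystem rr = newRoadSystem_alt rr := by
  unfold newRoadSystem newRoadSystem_alt
  simp only [pvALoop_eq_all, pvBFold_eq, List.nil_append]
  set n := rr.length with hn
  have hcolLen : (rr.foldl (fun c r => List.zipWith (fun c v => c + v) c r)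
      (List.replicate n 0)).length = n := by
    rw [pvColFold_length]
    · simp
    · intro r hr; simpa using hpre r hr
  rw [Bool.eq_iff_iff]
  simp only [List.all_eq_true, beq_iff_eq]
  constructor
  · -- A's per-index checks imply the two accumulated lists are equal
    intro hA
    apply List.ext_getElem
    · rw [List.length_map, hcolLen]
    · intro k h1 h2
      have hk : k < n := by simpa using h1
      have hi := hA (k : Int) (by
        rw [PySem.List.mem_pyRange_one]
        constructor
        · exact Int.natCast_nonneg k
        · exact_mod_cast hk)
      rw [PySem.List.foldl_pyRange_zero_pyGetD' rr []
        (fun acc r => acc + PySem.List.pyGetD r (k : Int) 0) 0] at hi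
      rw [PySem.List.foldl_add (l := rr) (g := fun r => PySem.List.pyGetD r (k : Int) 0) (a := 0)] at hi
      simp only [PySem.List.pyGetD_natCast, zero_add] at hi
      have hgd : (rr.foldl (fun c r => List.zipWith (fun c v => c + v) c r)
          (List.replicate n 0)).getD k 0
          = (rr.map (fun r => r.getD k 0)).sum := by
        rw [pvColFold_getD]
        · simp
        · intro r hr; simpa using hpre r hr
        · simpa using hk
      rw [List.getElem_map, ← List.getD_eq_getElem _ 0 h2, hgd]
      rw [List.getD_eq_getElem rr [] hk] at hi
      exact hi
  · -- equality of the lists gives each per-index check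
    intro hB i hi
    rw [PySem.List.mem_pyRange_one] at hi
    obtain ⟨h0, h1⟩ := hi
    obtain ⟨k, rfl⟩ := Int.eq_ofNat_of_zero_le h0
    have hk : k < n := by exact_mod_cast h1
    rw [PySem.List.foldl_pyRange_zero_pyGetD' rr []
        (fun acc r => acc + PySem.List.pyGetD r (k : Int) 0) 0,
      PySem.List.foldl_add (l := rr) (g := fun r => PySem.List.pyGetD r (k : Int) 0) (a := 0)]
    simp only [PySem.List.pyGetD_natCast, zero_add]
    have hgd : (rr.foldl (fun c r => List.zipWith (fun c v => c + v) c r)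
        (List.replicate n 0)).getD k 0
        = (rr.map (fun r => r.getD k 0)).sum := by
      rw [pvColFold_getD]
      · simp
      · intro r hr; simpa using hpre r hr
      · simpa using hk
    have := congrArg (fun l => l.getD k 0) hB
    simp only [hgd] at this
    rw [List.getD_eq_getElem _ 0 (by simpa using hk), List.getElem_map] at this
    rw [List.getD_eq_getElem rr [] hk]
    exact this

theorem newRoadSystem_spec : Claim_equal_newRoadSystem := by
  intro rr _ hpre
  unfold Spec_newRoadSystem
  by_cases hwide : ∀ r ∈ rr, rr.length ≤ r.length
  · exact pvMain_wide rr hwide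
  · -- some row is shorter than n, so Pre_ supplies a mismatch column k present in every row;
    -- A returns false at its check for k, and B's two lists have different lengths.
    rcases hpre with h | ⟨k, hkn, hkr, hne⟩
    · exact absurd h hwide
    push Not at hwide
    obtain ⟨rshort, hrs, hrslen⟩ := hwide
    -- A side: the check at index k fails
    have hA : newRoadSystem rr = false := by
      unfold newRoadSystem
      rw [pvALoop_eq_all]
      rw [Bool.eq_false_iff]
      intro hall
      rw [List.all_eq_true] at hall
      have hk := hall (k : Int) (by
        rw [PySem.List.mem_pyRange_one]
        exact ⟨Int.natCast_nonneg k, by exact_mod_cast hkn⟩)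
      rw [beq_iff_eq,
        PySem.List.foldl_pyRange_zero_pyGetD' rr []
          (fun acc r => acc + PySem.List.pyGetD r (k : Int) 0) 0,
        PySem.List.foldl_add (l := rr) (g := fun r => PySem.List.pyGetD r (k : Int) 0)
          (a := 0)] at hk
      simp only [PySem.List.pyGetD_natCast, zero_add] at hk
      apply hne
      rw [List.sum_eq_foldl]
      exact hk
    have hB : newRoadSystem_alt rr = false := by
      unfold newRoadSystem_alt
      simp only [pvBFold_eq, List.nil_append]
      rw [Bool.eq_false_iff]
      intro hbeq
      rw [beq_iff_eq] at hbeq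
      have hlen := congrArg List.length hbeq
      have hle := pvColFold_length_le rr (List.replicate rr.length 0) rshort hrs
      simp only [List.length_map] at hlen
      omega
    rw [hA, hB]
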